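-- pv_equiv track=rewrite | github.com/heia-fr/sirano | sirano/plugins/actions/raw_payload.py | anonymize
-- ===== SOURCE A (Python) =====
-- def anonymize(value):
--     value_len = len(value)
--     text = "ANONYMIZED BY SIRANO "
--     text_len = len(text)
--     s = ''
--     for i in range(value_len):
--         s += text[i % text_len]
--     return s
-- ===== SOURCE B (Python) =====
-- def anonymize(value):
--     value_len = len(value)
--     text = "ANONYMIZED BY SIRANO "
--     return (text * (value_len // len(text) + 1))[:value_len]
-- ===== Notes on version B (the rewrite author's own statement) =====
-- stated objective: faster
-- what changed: Replaces the per-character loop with repeated concatenation by one string multiplication plus a slice.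
import Mathlib
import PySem

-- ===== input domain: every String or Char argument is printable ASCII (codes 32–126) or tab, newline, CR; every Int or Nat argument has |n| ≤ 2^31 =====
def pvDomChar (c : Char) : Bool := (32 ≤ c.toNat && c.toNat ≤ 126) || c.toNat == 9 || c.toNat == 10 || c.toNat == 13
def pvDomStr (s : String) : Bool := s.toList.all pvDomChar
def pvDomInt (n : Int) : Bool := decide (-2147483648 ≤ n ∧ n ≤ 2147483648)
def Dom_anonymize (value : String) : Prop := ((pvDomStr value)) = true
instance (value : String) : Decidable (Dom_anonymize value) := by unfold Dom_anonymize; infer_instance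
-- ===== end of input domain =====

-- B replaces A's per-character concatenation loop by one repetition (string * count) plus a slice.

-- ===== PORT A =====
-- literal port of A: build s character by character, s += text[i % text_len]
def anonymize (value : String) : String :=
  let valueLen : Int := PySem.Str.len value
  let text : List Char := "ANONYMIZED BY SIRANO ".toList
  let textLen : Int := text.length
  let s : List Char :=
    (PySem.List.pyRange 0 valueLen 1).foldl
      (fun s i => s ++ [PySem.List.pyGetD text (PySem.Int.mod i textLen) ' ']) []
  String.ofList s

-- ===== PORT B =====
-- literal port of B: (text * (value_len // len(text) + 1))[:value_len]
def anonymize_alt (value : String) : String :=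
  let valueLen : Int := PySem.Str.len value
  let text : List Char := "ANONYMIZED BY SIRANO ".toList
  let rep : List Char :=
    (List.replicate (PySem.Int.floordiv valueLen (text.length : Int) + 1).toNat text).flatten
  String.ofList (PySem.List.slice rep none (some valueLen))

-- ===== PRECONDITION & SPEC =====
def Spec_anonymize (value : String) (out : String) : Prop := out = anonymize_alt value
instance (value : String) (out : String) : Decidable (Spec_anonymize value out) := by unfold Spec_anonymize; infer_instance

-- ===== CLAIM (what is proved, stated in full; the proofs are below) =====
def Claim_equal_anonymize : Prop := ∀ (value : String), Dom_anonymize value → Spec_anonymize value (anonymize value)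

-- ===== LEMMAS AND PROOFS =====

-- indexing into a flattened replication is cyclic indexing into the block
lemma flatten_replicate_getElem? (xs : List Char) (m i : Nat) (h : i < xs.length * m) :
    (List.flatten (List.replicate m xs))[i]? = xs[i % xs.length]? := by
  induction m generalizing i with
  | zero => omega
  | succ m ih =>
      rw [Nat.mul_succ] at h
      rw [List.replicate_succ, List.flatten_cons]
      by_cases hi : i < xs.length
      · rw [List.getElem?_append_left hi, Nat.mod_eq_of_lt hi]
      · have hx : 0 < xs.length := by
          rcases Nat.eq_zero_or_pos xs.length with h0 | hx
          · rw [h0, Nat.zero_mul] at h; omega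
          · exact hx
        have hij : i = xs.length + (i - xs.length) := by omega
        rw [hij, List.getElem?_append_right (by omega)]
        have := ih (i - xs.length) (by omega)
        rw [Nat.add_sub_cancel_left, this, Nat.add_mod_left]

lemma anonymize_main (value : String) : Spec_anonymize value (anonymize value) := by
  unfold Spec_anonymize anonymize anonymize_alt
  simp only [PySem.Str.len_eq]
  set text : List Char := "ANONYMIZED BY SIRANO ".toList with htext
  have htl : text.length = 21 := by decide
  set n : Nat := value.toList.length with hn
  rw [PySem.List.foldl_append_singleton_eq_map, List.nil_append,
      PySem.List.slice_to_natCast, PySem.List.pyRange_zero_natCast]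
  set m : Nat := (PySem.Int.floordiv (n : Int) (text.length : Int) + 1).toNat with hm
  have hfd : PySem.Int.floordiv (n : Int) (text.length : Int) = ((n / 21 : Nat) : Int) := by
    rw [htl]
    simp [PySem.Int.floordiv, Int.fdiv_eq_ediv]
  have hmn : n < text.length * m := by
    rw [hm, hfd, htl]
    omega
  apply congrArg String.ofList
  apply List.ext_getElem?
  intro i
  by_cases hi : i < n
  · rw [List.getElem?_take_of_lt hi, flatten_replicate_getElem? text m i (by omega)]
    simp only [List.getElem?_map, List.getElem?_range hi]
    have hmod : PySem.Int.mod ((i : Nat) : Int) ((text.length : Nat) : Int)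
        = ((i % text.length : Nat) : Int) := by
      simp [PySem.Int.mod, Int.fmod_eq_emod]
    simp only [Option.map_some]
    rw [hmod]
    have hlt : i % text.length < text.length := Nat.mod_lt _ (by omega)
    rw [PySem.List.pyGetD_natCast, List.getD_eq_getElem?_getD, List.getElem?_eq_getElem hlt]
    simp
  · have h1 : (List.map (fun i => PySem.List.pyGetD text (PySem.Int.mod i ↑text.length) ' ')
        (List.map (fun k : Nat => (k : Int)) (List.range n)))[i]? = none := by
      rw [List.getElem?_eq_none_iff]; simp; omega
    have h2 : ((List.flatten (List.replicate m text)).take n)[i]? = none := by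
      rw [List.getElem?_eq_none_iff]
      have := List.length_take_le n (List.flatten (List.replicate m text))
      omega
    rw [h1, h2]

-- ===== VERDICT (by name: the statement is the Claim_ definition above) =====
theorem anonymize_spec : Claim_equal_anonymize := fun value _ => anonymize_main value
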